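-- pv_equiv track=rewrite | github.com/DrakeWYH/TicTacToe-RL | play_tictactoe_qlearning.py | hashBoard
-- ===== SOURCE A (Python) =====
-- def hashBoard(board):
--     result = 0
--     for i in range(9):
--         if board[i] == -1:
--             result += 2 * 3 ** i
--         else:
--             result += board[i] * 3 ** i
--     return int(result)
-- ===== SOURCE B (Python) =====
-- def hashBoard(board):
--     digits = [2 if board[i] == -1 else board[i] for i in range(9)]
--     base = 3
--     while len(digits) > 1:
--         if len(digits) % 2 == 1:
--             digits.append(0)
--         digits = [digits[j] + digits[j + 1] * base for j in range(0, len(digits), 2)]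
--         base = base * base
--     return int(digits[0])
-- ===== Notes on version B (the rewrite author's own statement) =====
-- stated objective: alternative
-- what changed: Replaces the single linear summation of board[i]*3**i terms with a tree (pairwise) reduction: map cells to base-3 digits once, then repeatedly merge adjacent pairs as lo + hi*base while squaring the base, until one value remains.
import Mathlib
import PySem

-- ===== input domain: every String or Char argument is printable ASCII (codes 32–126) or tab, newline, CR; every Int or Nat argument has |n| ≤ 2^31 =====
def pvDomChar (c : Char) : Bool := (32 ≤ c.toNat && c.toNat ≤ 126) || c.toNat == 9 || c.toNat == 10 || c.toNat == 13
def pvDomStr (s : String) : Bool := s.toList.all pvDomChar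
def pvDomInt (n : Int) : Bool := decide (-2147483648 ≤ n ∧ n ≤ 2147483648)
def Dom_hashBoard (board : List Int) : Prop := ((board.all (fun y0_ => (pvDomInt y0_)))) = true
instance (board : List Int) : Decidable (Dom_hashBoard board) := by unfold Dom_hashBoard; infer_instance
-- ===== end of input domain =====

-- B replaces A's linear sum of board[i]*3**i terms with a pairwise tree reduction (merge adjacent pairs, squaring the base each pass); alternative decomposition, same cost.


-- ===== PORT A =====
-- literal port of A: for i in range(9): result += (2 if board[i]==-1 else board[i]) * 3**i
-- board[i] is pyGet?; outside Pre_ (length < 9) Python raises IndexError, port defaults (excluded by Pre_)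
def hashBoard (board : List Int) : Int :=
  (PySem.List.pyRange 0 9 1).foldl
    (fun result i =>
      let b := (PySem.List.pyGet? board i).getD 0
      if b = -1 then result + 2 * 3 ^ i.toNat else result + b * 3 ^ i.toNat) 0

-- ===== PORT B =====
-- digits = [2 if board[i]==-1 else board[i] for i in range(9)]
def pvDigitsB (board : List Int) : List Int :=
  (PySem.List.pyRange 0 9 1).map (fun i =>
    let b := (PySem.List.pyGet? board i).getD 0
    if b = -1 then 2 else b)

-- [digits[j] + digits[j+1]*base for j in range(0, len(digits), 2)] on an even-length list
def pvPairs (base : Int) : List Int → List Int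
  | x :: y :: t => (x + y * base) :: pvPairs base t
  | l => l

-- length fact the while-loop's termination needs
theorem pvPairs_length (base : Int) (l : List Int) :
    (pvPairs base l).length = (l.length + 1) / 2 := by
  match l with
  | [] => rfl
  | [x] => simp [pvPairs]
  | x :: y :: t =>
    have := pvPairs_length base t
    simp [pvPairs, this]
    omega

-- while len(digits) > 1: pad to even length, pair-merge, square the base; return digits[0]
def pvLoop (digits : List Int) (base : Int) : Int :=
  if digits.length > 1 then
    let d := if digits.length % 2 = 1 then digits ++ [0] else digits
    pvLoop (pvPairs base d) (base * base)
  else (PySem.List.pyGet? digits 0).getD 0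
termination_by digits.length
decreasing_by
  rename_i h
  by_cases hodd : digits.length % 2 = 1 <;>
    simp [hodd, pvPairs_length] <;> omega

def hashBoard_alt (board : List Int) : Int :=
  pvLoop (pvDigitsB board) 3

-- ===== PRECONDITION & SPEC =====
-- A indexes board[0..8], so it raises IndexError on boards shorter than 9; those inputs are excluded.
def Pre_hashBoard (board : List Int) : Prop := 9 ≤ board.length
instance (board : List Int) : Decidable (Pre_hashBoard board) := by unfold Pre_hashBoard; infer_instance
def pvWitness_hashBoard : List Int := [0, 1, -1, 0, 1, -1, 0, 1, -1]

def Spec_hashBoard (board : List Int) (out : Int) : Prop := out = hashBoard_alt board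
instance (board : List Int) (out : Int) : Decidable (Spec_hashBoard board out) := by unfold Spec_hashBoard; infer_instance

-- ===== CLAIM (what is proved, stated in full; the proofs are below) =====
def Claim_equal_hashBoard : Prop := ∀ (board : List Int), Dom_hashBoard board → Pre_hashBoard board → Spec_hashBoard board (hashBoard board)

-- ===== LEMMAS AND PROOFS =====

-- digit mapping used by both programs: -1 encodes as 2
def pvDigit (x : Int) : Int := if x = -1 then 2 else x

-- base-3 value of a digit list (A's invariant), least-significant digit first
def pvS (l : List Int) : Int := l.foldr (fun x r => r * 3 + pvDigit x) 0

-- base-b value of a plain digit list (B's invariant)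
def pvV (b : Int) (l : List Int) : Int := l.foldr (fun x r => r * b + x) 0

theorem pvS_foldr_init (l : List Int) (b : Int) :
    l.foldr (fun x r => r * 3 + pvDigit x) b = pvS l + b * 3 ^ l.length := by
  induction l with
  | nil => simp [pvS]
  | cons x t ih =>
    rw [List.foldr_cons, ih]
    have hx : pvS (x :: t) = pvS t * 3 + pvDigit x := by simp [pvS]
    rw [hx, List.length_cons, pow_succ]
    ring

theorem pvS_append_singleton (t : List Int) (y : Int) :
    pvS (t ++ [y]) = pvS t + pvDigit y * 3 ^ t.length := by
  unfold pvS
  rw [List.foldr_append]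
  simp only [List.foldr_cons, List.foldr_nil, zero_mul, zero_add]
  rw [pvS_foldr_init]
  rfl

theorem pvA_loop (l : List Int) (n : Nat) (h : n ≤ l.length) :
    (PySem.List.pyRange 0 (n : Int) 1).foldl
      (fun result i =>
        let b := (PySem.List.pyGet? l i).getD 0
        if b = -1 then result + 2 * 3 ^ i.toNat else result + b * 3 ^ i.toNat) 0
    = pvS (l.take n) := by
  induction n with
  | zero => simp [pvS]
  | succ n ih =>
    have hn : n < l.length := by omega
    have hrange : PySem.List.pyRange 0 ((n : Int) + 1) 1
        = PySem.List.pyRange 0 (n : Int) 1 ++ [(n : Int)] := by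
      simpa using PySem.List.pyRange_one_succ_right (a := 0) (b := (n : Int)) (by omega)
    have hcast : ((n + 1 : Nat) : Int) = (n : Int) + 1 := by push_cast; ring
    rw [hcast, hrange, List.foldl_append, ih (by omega)]
    have hget : PySem.List.pyGet? l (n : Int) = some l[n] := by
      simp [PySem.List.pyGet?_natCast, List.getElem?_eq_getElem hn]
    have htake : l.take (n + 1) = l.take n ++ [l[n]] := by
      rw [List.take_add_one, List.getElem?_eq_getElem hn]; rfl
    rw [htake, pvS_append_singleton]
    simp only [List.foldl_cons, List.foldl_nil]
    rw [hget]
    simp only [Option.getD_some, Int.toNat_natCast, List.length_take,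
      min_eq_left (le_of_lt hn)]
    unfold pvDigit
    split_ifs <;> ring

-- the nine digits B builds are exactly pvDigit over the first nine cells
theorem pvDigitsB_map (l : List Int) (n : Nat) (h : n ≤ l.length) :
    (PySem.List.pyRange 0 (n : Int) 1).map (fun i =>
      let b := (PySem.List.pyGet? l i).getD 0
      if b = -1 then 2 else b)
    = (l.take n).map pvDigit := by
  induction n with
  | zero => simp
  | succ n ih =>
    have hn : n < l.length := by omega
    have hrange : PySem.List.pyRange 0 ((n : Int) + 1) 1
        = PySem.List.pyRange 0 (n : Int) 1 ++ [(n : Int)] := by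
      simpa using PySem.List.pyRange_one_succ_right (a := 0) (b := (n : Int)) (by omega)
    have hcast : ((n + 1 : Nat) : Int) = (n : Int) + 1 := by push_cast; ring
    have hget : PySem.List.pyGet? l (n : Int) = some l[n] := by
      simp [PySem.List.pyGet?_natCast, List.getElem?_eq_getElem hn]
    have htake : l.take (n + 1) = l.take n ++ [l[n]] := by
      rw [List.take_add_one, List.getElem?_eq_getElem hn]; rfl
    rw [hcast, hrange, List.map_append, ih (by omega), htake, List.map_append]
    simp [hget, pvDigit]

-- padding with a trailing zero does not change the value
theorem pvV_append_zero (b : Int) (l : List Int) : pvV b (l ++ [0]) = pvV b l := by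
  unfold pvV
  rw [List.foldr_append]
  simp

-- one pair-merge pass re-reads the list in base b*b
theorem pvV_pairs (b : Int) (l : List Int) (h : l.length % 2 = 0) :
    pvV (b * b) (pvPairs b l) = pvV b l := by
  match l with
  | [] => rfl
  | [x] => simp at h
  | x :: y :: t =>
    have ht : t.length % 2 = 0 := by simp at h; omega
    have ih := pvV_pairs b t ht
    unfold pvV at ih ⊢
    simp only [pvPairs, List.foldr_cons]
    rw [ih]
    ring

-- the while loop computes the base-b value of its digit list
theorem pvLoop_eq (l : List Int) (b : Int) (h : 1 ≤ l.length) :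
    pvLoop l b = pvV b l := by
  rw [pvLoop]
  by_cases hgt : l.length > 1
  · simp only [hgt, if_true]
    by_cases hodd : l.length % 2 = 1
    · rw [if_pos hodd]
      have hev : (l ++ [0]).length % 2 = 0 := by simp; omega
      have hlen : 1 ≤ (pvPairs b (l ++ [0])).length := by
        rw [pvPairs_length]; simp; omega
      rw [pvLoop_eq _ _ hlen, pvV_pairs b _ hev, pvV_append_zero]
    · rw [if_neg hodd]
      have hev : l.length % 2 = 0 := by omega
      have hlen : 1 ≤ (pvPairs b l).length := by
        rw [pvPairs_length]; omega
      rw [pvLoop_eq _ _ hlen, pvV_pairs b _ hev]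
  · simp only [hgt, if_false]
    have : l.length = 1 := by omega
    match l, this with
    | [x], _ => simp [PySem.List.pyGet?, PySem.List.pyIdx?, pvV]
termination_by l.length
decreasing_by
  · rw [pvPairs_length]; simp; omega
  · rw [pvPairs_length]; omega

-- base-3 value of the mapped digits is A's invariant
theorem pvV_map_digit (l : List Int) : pvV 3 (l.map pvDigit) = pvS l := by
  induction l with
  | nil => rfl
  | cons x t ih =>
    simp only [pvV, pvS, List.map_cons, List.foldr_cons] at ih ⊢
    rw [ih]

theorem pvB_eq (board : List Int) (h : 9 ≤ board.length) :
    hashBoard_alt board = pvS (board.take 9) := by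
  unfold hashBoard_alt
  have hd : pvDigitsB board = (board.take 9).map pvDigit := by
    unfold pvDigitsB
    exact_mod_cast pvDigitsB_map board 9 h
  have hlen : 1 ≤ (pvDigitsB board).length := by
    rw [hd]; simp; omega
  rw [pvLoop_eq _ _ hlen, hd, pvV_map_digit]

-- ===== VERDICT (by name: the statement is the Claim_ definition above) =====
theorem hashBoard_spec : Claim_equal_hashBoard := by
  intro board _ hpre
  unfold Pre_hashBoard at hpre
  show hashBoard board = hashBoard_alt board
  rw [pvB_eq board hpre]
  have := pvA_loop board 9 hpre
  unfold hashBoard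
  norm_num at this ⊢
  exact this
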